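-- pv_equiv track=rewrite | github.com/Gopal-next/Daily-Solving | Daily Solving/GFG/string/palindrome_series.py | pallan
-- ===== SOURCE A (Python) =====
-- def pallan (n) :
--     #Complete the function
--     dic = {
--         '0':'a',
--         '1':'b',
--         '2':'c',
--         '3':'d',
--         '4':'e',
--         '5':'f',
--         '6':'g',
--         '7':'h',
--         '8':'i',
--         '9':'j'
--     }
--     a = ''
--     b = 0
--     strr = str(n)
--     for i in range(len(strr)):
--         a += dic[strr[i]]
--         b += int(strr[i])
--     first = a * (b//len(strr))
--     second = (b%len(strr))
--
--     c =  first + a[:second]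
--     if c == c[::-1]:
--         return True
--     else:
--         return False
-- ===== SOURCE B (Python) =====
-- def pallan(n):
--     # Two-pointer check on the virtual repeated string: c[i] = str(n)[i % L],
--     # and digit equality iff letter equality (the digit->letter map is injective),
--     # so the letter string and c itself are never materialized.
--     d = str(n)
--     L = len(d)
--     b = sum(int(ch) for ch in d)
--     for i in range(b // 2):
--         if d[i % L] != d[(b - 1 - i) % L]:
--             return False
--     return True
-- ===== Notes on version B (the rewrite author's own statement) =====
-- stated objective: alternative
-- what changed: B drops the digit-to-letter dict and the materialized repeated string c and its reversal: since the digit-to-letter map is injective, it checks the palindrome with a two-pointer loop over virtual indices c[i] = str(n)[i % L], exiting early on the first mismatch.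
import Mathlib
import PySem

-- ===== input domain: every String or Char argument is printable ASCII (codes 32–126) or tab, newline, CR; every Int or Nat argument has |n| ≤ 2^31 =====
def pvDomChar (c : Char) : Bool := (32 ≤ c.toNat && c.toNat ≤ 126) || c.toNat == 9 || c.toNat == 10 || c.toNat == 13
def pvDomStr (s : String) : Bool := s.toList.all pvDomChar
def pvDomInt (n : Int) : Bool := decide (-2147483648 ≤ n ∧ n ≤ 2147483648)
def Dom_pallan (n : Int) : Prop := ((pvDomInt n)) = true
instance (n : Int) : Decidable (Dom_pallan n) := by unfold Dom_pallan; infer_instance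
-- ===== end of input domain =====

-- B drops the digit-to-letter dict and the materialized repeated string and its reversal:
-- it checks the palindrome by a two-pointer loop over virtual indices str(n)[i % L], exiting early.

-- ===== PORT A =====
def pallanDic : PySem.Dict Char Char :=
  PySem.Dict.ofList [('0','a'),('1','b'),('2','c'),('3','d'),('4','e'),
                     ('5','f'),('6','g'),('7','h'),('8','i'),('9','j')]

def pallan (n : Int) : Bool :=
  let strr := PySem.Int.toChars n
  -- for i in range(len(strr)): a += dic[strr[i]]; b += int(strr[i])
  -- (dic[...] raises KeyError on a non-digit char — excluded by Pre_; getD stands in for the lookup)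
  let ab := strr.foldl (fun (ab : List Char × Int) ch =>
      (ab.1 ++ [pallanDic.getD ch ' '], ab.2 + (PySem.Int.ofChars? [ch]).getD 0)) ([], 0)
  let a := ab.1
  let b := ab.2
  let first := PySem.List.pyRepeat a (PySem.Int.floordiv b (PySem.List.len strr))
  let second := PySem.Int.mod b (PySem.List.len strr)
  let c := first ++ PySem.List.slice a none (some second)
  c == c.reverse  -- c == c[::-1]; xs[::-1] is xs.reverse (PySem.List.slice?_none_none_neg_one)

-- ===== PORT B =====
def pallan_alt (n : Int) : Bool :=
  let d := PySem.Int.toChars n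
  let L := PySem.List.len d
  let b := d.foldl (fun s ch => s + (PySem.Int.ofChars? [ch]).getD 0) 0
  (PySem.List.pyRange 0 (PySem.Int.floordiv b 2) 1).all (fun i =>
    PySem.List.pyGet? d (PySem.Int.mod i L) == PySem.List.pyGet? d (PySem.Int.mod (b - 1 - i) L))

-- ===== PRECONDITION & SPEC =====
-- Pre_ excludes negative n only: str(n) then starts with '-', on which A raises KeyError (dic['-']).
def Pre_pallan (n : Int) : Prop := 0 ≤ n
instance (n : Int) : Decidable (Pre_pallan n) := by unfold Pre_pallan; infer_instance
def pvWitness_pallan : Int := (121)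

def Spec_pallan (n : Int) (out : Bool) : Prop := out = pallan_alt n
instance (n : Int) (out : Bool) : Decidable (Spec_pallan n out) := by unfold Spec_pallan; infer_instance

-- ===== CLAIM (what is proved, stated in full; the proofs are below) =====
def Claim_equal_pallan : Prop := ∀ (n : Int), Dom_pallan n → Pre_pallan n → Spec_pallan n (pallan n)

-- ===== LEMMAS AND PROOFS =====

-- the ten digit characters; str(n) for n ≥ 0 consists of exactly these
def pallanDigits : List Char := ['0','1','2','3','4','5','6','7','8','9']

-- A's letter map and the per-character summand, named for the proofs
def pvF (ch : Char) : Char := pallanDic.getD ch ' '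
def pvG (ch : Char) : Int := (PySem.Int.ofChars? [ch]).getD 0

lemma digitChar_mem (k : ℕ) (h : k < 10) : Nat.digitChar k ∈ pallanDigits := by
  interval_cases k <;> decide

lemma toDigitsCore_digits : ∀ (fuel n : ℕ) (ds : List Char), (∀ c ∈ ds, c ∈ pallanDigits) →
    ∀ c ∈ Nat.toDigitsCore 10 fuel n ds, c ∈ pallanDigits := by
  intro fuel
  induction fuel with
  | zero => intro n ds h c hc; simpa [Nat.toDigitsCore] using h c (by simpa [Nat.toDigitsCore] using hc)
  | succ fuel ih =>
    intro n ds h c hc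
    rw [Nat.toDigitsCore] at hc
    by_cases h0 : n / 10 = 0
    · simp only [h0, if_pos] at hc
      rcases List.mem_cons.1 hc with rfl | hm
      · exact digitChar_mem _ (Nat.mod_lt _ (by norm_num))
      · exact h c hm
    · simp only [if_neg h0] at hc
      refine ih _ _ ?_ c hc
      intro c' hc'
      rcases List.mem_cons.1 hc' with rfl | hm
      · exact digitChar_mem _ (Nat.mod_lt _ (by norm_num))
      · exact h c' hm

lemma toDigits_digits (m : ℕ) : ∀ c ∈ Nat.toDigits 10 m, c ∈ pallanDigits :=
  toDigitsCore_digits _ _ _ (by simp)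

lemma toDigitsCore_ne_nil : ∀ (fuel n : ℕ) (ds : List Char), ds ≠ [] →
    Nat.toDigitsCore 10 fuel n ds ≠ [] := by
  intro fuel
  induction fuel with
  | zero => intro n ds h; simpa [Nat.toDigitsCore] using h
  | succ fuel ih =>
    intro n ds h
    rw [Nat.toDigitsCore]
    by_cases h0 : n / 10 = 0
    · simp [h0]
    · simp only [if_neg h0]; exact ih _ _ (by simp)

lemma toDigits_ne_nil (m : ℕ) : Nat.toDigits 10 m ≠ [] := by
  rw [Nat.toDigits, Nat.toDigitsCore]
  by_cases h0 : m / 10 = 0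
  · simp [h0]
  · simp only [if_neg h0]; exact toDigitsCore_ne_nil _ _ _ (by simp)

-- int(ch) of a digit char is never negative
lemma g_nonneg (ch : Char) (h : ch ∈ pallanDigits) : 0 ≤ pvG ch := by
  fin_cases h <;> decide

-- the digit→letter map is injective on digit chars
lemma dic_inj (c₁ c₂ : Char) (h₁ : c₁ ∈ pallanDigits) (h₂ : c₂ ∈ pallanDigits)
    (h : pvF c₁ = pvF c₂) : c₁ = c₂ := by
  fin_cases h₁ <;> fin_cases h₂ <;> first | rfl | (exfalso; revert h; decide)

lemma cyc_length (a : List Char) (q r : ℕ) (hr : r ≤ a.length) :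
    ((List.replicate q a).flatten ++ a.take r).length = q * a.length + r := by
  induction q with
  | zero => simp [Nat.min_eq_left hr]
  | succ q ih =>
    rw [List.replicate_succ, List.flatten_cons, List.append_assoc, List.length_append, ih,
      Nat.succ_mul]
    omega

-- cyclic indexing of q copies of a followed by a.take r
lemma cyc_getElem? (a : List Char) (q r : ℕ) (hr : r ≤ a.length) :
    ∀ k, k < q * a.length + r →
      ((List.replicate q a).flatten ++ a.take r)[k]? = a[k % a.length]? := by
  induction q with
  | zero =>
    intro k hk
    simp only [List.replicate, List.flatten_nil, List.nil_append]
    rw [List.getElem?_take_of_lt (by omega), Nat.mod_eq_of_lt (by omega)]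
  | succ q ih =>
    intro k hk
    have hs : (q + 1) * a.length = q * a.length + a.length := Nat.succ_mul q a.length
    simp only [List.replicate_succ, List.flatten_cons, List.append_assoc]
    by_cases h : k < a.length
    · rw [List.getElem?_append_left h, Nat.mod_eq_of_lt h]
    · have hak : a.length ≤ k := by omega
      rw [List.getElem?_append_right hak, ih (k - a.length) (by omega)]
      rw [Nat.mod_eq_sub_mod hak]

-- a list is a palindrome iff its first half mirrors its second half
lemma pal_iff (l : List Char) :
    (l = l.reverse) ↔ ∀ i, i < l.length / 2 → l[i]? = l[l.length - 1 - i]? := by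
  constructor
  · intro h i hi
    conv_lhs => rw [h]
    rw [List.getElem?_reverse (by omega)]
  · intro h
    apply List.ext_getElem?
    intro i
    by_cases hi : i < l.length
    · rw [List.getElem?_reverse hi]
      rcases Nat.lt_trichotomy i (l.length - 1 - i) with hlt | heq | hgt
      · exact h i (by omega)
      · rw [heq]
        congr 1
        omega
      · have h2 : l.length - 1 - i < l.length / 2 := by omega
        have := h _ h2
        rw [show l.length - 1 - (l.length - 1 - i) = i by omega] at this
        exact this.symm
    · rw [List.getElem?_eq_none (by omega), List.getElem?_eq_none (by simp; omega)]

-- A's string c is a palindrome iff B's half-scan over the raw digit chars succeeds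
lemma half_iff (s : List Char) (hdig : ∀ c ∈ s, c ∈ pallanDigits) (N : ℕ)
    (hL : 0 < s.length) :
    (let c := (List.replicate (N / s.length) (s.map pvF)).flatten
                ++ (s.map pvF).take (N % s.length)
     c = c.reverse)
    ↔ ∀ k, k < N / 2 → s[k % s.length]? = s[(N - 1 - k) % s.length]? := by
  have hml : (s.map pvF).length = s.length := List.length_map ..
  have hr : N % s.length ≤ (s.map pvF).length := by rw [hml]; exact le_of_lt (Nat.mod_lt _ hL)
  have hNd : N / s.length * (s.map pvF).length + N % s.length = N := by
    rw [hml, Nat.mul_comm]; exact Nat.div_add_mod N s.length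
  rw [pal_iff, cyc_length _ _ _ hr, hNd]
  apply forall_congr'
  intro k
  by_cases hk : k < N / 2
  · simp only [hk, forall_true_left]
    have hkN : k < N := by omega
    have hkN' : N - 1 - k < N := by omega
    rw [cyc_getElem? _ _ _ hr k (by omega), cyc_getElem? _ _ _ hr (N - 1 - k) (by omega)]
    rw [hml]
    have hi : k % s.length < s.length := Nat.mod_lt _ hL
    have hj : (N - 1 - k) % s.length < s.length := Nat.mod_lt _ hL
    rw [List.getElem?_map, List.getElem?_map,
      List.getElem?_eq_getElem hi, List.getElem?_eq_getElem hj]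
    simp only [Option.map_some, Option.some_inj]
    constructor
    · intro h
      exact dic_inj _ _ (hdig _ (List.getElem_mem _)) (hdig _ (List.getElem_mem _)) h
    · intro h; rw [h]
  · simp [hk]

lemma pallan_main (n : Int) (hp : 0 ≤ n) : pallan n = pallan_alt n := by
  unfold pallan pallan_alt
  have hn : ¬ n < 0 := not_lt.2 hp
  simp only [PySem.Int.toChars, if_neg hn]
  set s : List Char := Nat.toDigits 10 n.toNat with hs_def
  have hs : s ≠ [] := toDigits_ne_nil _
  have hdig : ∀ c ∈ s, c ∈ pallanDigits := toDigits_digits _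
  have hL : 0 < s.length := List.length_pos_iff.2 hs
  rw [PySem.List.foldl_prod_mk (fun acc ch => acc ++ [pallanDic.getD ch ' '])
    (fun acc ch => acc + (PySem.Int.ofChars? [ch]).getD 0) s ([] : List Char) (0 : Int)]
  simp only [PySem.List.foldl_append_singleton_eq_map,
    PySem.List.foldl_add, List.nil_append, zero_add, PySem.List.len_eq]
  set b : Int := (s.map (fun ch => (PySem.Int.ofChars? [ch]).getD 0)).sum with hb_def
  have hb : 0 ≤ b := by
    apply List.sum_nonneg
    intro x hx
    obtain ⟨c, hc, rfl⟩ := List.mem_map.1 hx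
    exact g_nonneg c (hdig c hc)
  set N : ℕ := b.toNat with hN_def
  have hbN : b = (N : ℤ) := (Int.toNat_of_nonneg hb).symm
  rw [hbN]
  rw [PySem.Int.floordiv_eq_ediv_of_pos (b := 2) (by norm_num)]
  have h2 : ((N : ℤ)) / 2 = ((N / 2 : ℕ) : ℤ) := by omega
  rw [h2]
  simp only [PySem.Int.floordiv_natCast, PySem.Int.mod_natCast, PySem.List.pyRepeat,
    Int.toNat_natCast]
  rw [PySem.List.slice_to _ (Int.natCast_nonneg _)]
  rw [Int.toNat_natCast]
  rw [Bool.eq_iff_iff, beq_iff_eq, List.all_eq_true]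
  rw [show (fun x => pallanDic.getD x ' ') = pvF from rfl]
  have hhalf := half_iff s hdig N hL
  rw [hhalf]
  constructor
  · intro h i hi
    rw [PySem.List.mem_pyRange_one] at hi
    obtain ⟨hi0, hi2⟩ := hi
    set k : ℕ := i.toNat with hk_def
    have hik : i = (k : ℤ) := (Int.toNat_of_nonneg hi0).symm
    have hk2 : k < N / 2 := by omega
    have hN2 : 2 ≤ N := by omega
    have e1 : PySem.Int.mod i (s.length : ℤ) = ((k % s.length : ℕ) : ℤ) := by
      rw [hik]; exact PySem.Int.mod_natCast k s.length
    have e3 : PySem.Int.mod ((N : ℤ) - 1 - i) (s.length : ℤ) = (((N - 1 - k) % s.length : ℕ) : ℤ) := by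
      rw [show ((N : ℤ) - 1 - i) = ((N - 1 - k : ℕ) : ℤ) by omega]
      exact PySem.Int.mod_natCast _ s.length
    rw [e1, e3, PySem.List.pyGet?_natCast, PySem.List.pyGet?_natCast, beq_iff_eq]
    exact h k hk2
  · intro h k hk
    have := h ((k : ℤ)) (by rw [PySem.List.mem_pyRange_one]; constructor <;> omega)
    have hN2 : 2 ≤ N := by omega
    rw [PySem.Int.mod_natCast] at this
    rw [show ((N : ℤ) - 1 - (k : ℤ)) = ((N - 1 - k : ℕ) : ℤ) by omega, PySem.Int.mod_natCast,
      PySem.List.pyGet?_natCast, PySem.List.pyGet?_natCast, beq_iff_eq] at this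
    exact this

-- ===== VERDICT (by name: the statement is the Claim_ definition above) =====
theorem pallan_spec : Claim_equal_pallan := by
  intro n _ hp
  unfold Spec_pallan
  exact pallan_main n hp
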